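-- pv_equiv track=rewrite | github.com/garfieldnate/scratch | format_germ_freq/make_toc.py | add_toc
-- ===== SOURCE A (Python) =====
-- def add_toc(lines):
-- 	toc_lines = []
-- 	new_lines = []
-- 	entry_counter = 0
-- 	space_counter = 0
-- 	for line in lines:
-- 		if "<div class='entry'" in line:
-- 			entry_counter += 1
-- 			space_counter += 1
-- 			if space_counter % 50 == 0:
-- 				space_counter = 0
-- 				new_lines.append(f'<span id="{entry_counter}">Entry number {entry_counter} (<a href="#top">top</a>)</span>')
-- 				toc_lines.append(f'<a href="#{entry_counter}">{entry_counter}</a><br/>')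
-- 		new_lines.append(line)
--
-- 	return new_lines[0:3] + ['<div id="top"></div>'] + toc_lines + new_lines[3:]
-- ===== SOURCE B (Python) =====
-- def add_toc(lines):
-- 	marker = "<div class='entry'"
-- 	counts = []
-- 	c = 0
-- 	for line in lines:
-- 		if marker in line:
-- 			c += 1
-- 		counts.append(c)
-- 	total = counts[-1] if counts else 0
-- 	toc_lines = [f'<a href="#{n}">{n}</a><br/>' for n in range(50, total + 1, 50)]
-- 	new_lines = [piece
-- 		for line, n, prev in zip(lines, counts, [0] + counts)
-- 		for piece in ([f'<span id="{n}">Entry number {n} (<a href="#top">top</a>)</span>', line]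
-- 			if n > prev and n % 50 == 0 else [line])]
-- 	return new_lines[0:3] + ['<div id="top"></div>'] + toc_lines + new_lines[3:]
-- ===== Notes on version B (the rewrite author's own statement) =====
-- stated objective: alternative
-- what changed: A interleaves TOC building with the rewrite in one stateful loop carrying two counters and two output lists; B precomputes the list of prefix entry-counts, derives the total and the whole TOC from it via range(50, total+1, 50), and produces the rewritten body as a stateless comprehension over zip(lines, counts, [0]+counts).
import Mathlib
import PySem

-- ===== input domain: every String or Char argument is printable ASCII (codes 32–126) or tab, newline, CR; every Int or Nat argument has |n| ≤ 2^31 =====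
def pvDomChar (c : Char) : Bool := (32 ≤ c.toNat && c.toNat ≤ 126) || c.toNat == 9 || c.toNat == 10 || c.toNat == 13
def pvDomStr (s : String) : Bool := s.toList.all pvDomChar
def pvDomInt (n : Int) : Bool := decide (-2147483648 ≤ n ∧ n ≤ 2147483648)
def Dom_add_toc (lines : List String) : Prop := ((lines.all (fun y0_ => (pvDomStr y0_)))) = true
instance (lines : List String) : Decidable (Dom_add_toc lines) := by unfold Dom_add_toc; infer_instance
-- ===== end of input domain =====

-- B replaces A's single stateful loop (two counters, two accumulated lists) by a data-driven
-- decomposition: a prefix-count list, a TOC comprehension over range(50, total+1, 50), and a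
-- stateless flatMap over zip(lines, counts, 0 :: counts) (objective: alternative; same O(n)).

-- shared f-string formatters (identical literals in both Pythons)
def pvMarker : String := "<div class='entry'"
def pvSpan (n : Int) : String :=
  "<span id=\"" ++ PySem.Int.toStr n ++ "\">Entry number " ++ PySem.Int.toStr n ++ " (<a href=\"#top\">top</a>)</span>"
def pvToc (n : Int) : String :=
  "<a href=\"#" ++ PySem.Int.toStr n ++ "\">" ++ PySem.Int.toStr n ++ "</a><br/>"

-- ===== PORT A =====
def pvStepA (st : List String × List String × Int × Int) (line : String) :
    List String × List String × Int × Int :=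
  match st with
  | (toc_lines, new_lines, entry_counter, space_counter) =>
    if PySem.Str.isIn pvMarker line then
      let entry_counter := entry_counter + 1
      let space_counter := space_counter + 1
      if PySem.Int.mod space_counter 50 == 0 then
        (toc_lines ++ [pvToc entry_counter], new_lines ++ [pvSpan entry_counter, line],
         entry_counter, 0)
      else
        (toc_lines, new_lines ++ [line], entry_counter, space_counter)
    else
      (toc_lines, new_lines ++ [line], entry_counter, space_counter)

def add_toc (lines : List String) : List String :=
  match lines.foldl pvStepA ([], [], 0, 0) with
  | (toc_lines, new_lines, _, _) =>
    PySem.List.slice new_lines (some 0) (some 3) ++ ["<div id=\"top\"></div>"] ++ toc_lines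
      ++ PySem.List.slice new_lines (some 3) none

-- ===== PORT B =====
-- the counts-building loop of Source B: append the running prefix count after each line
def pvCntStep (st : List Int × Int) (line : String) : List Int × Int :=
  let c := if PySem.Str.isIn pvMarker line then st.2 + 1 else st.2
  (st.1 ++ [c], c)

def add_toc_alt (lines : List String) : List String :=
  let counts := (lines.foldl pvCntStep ([], 0)).1
  -- 'counts[-1] if counts else 0' (pyGet? is none exactly when counts is empty)
  let total : Int := (PySem.List.pyGet? counts (-1)).getD 0
  let toc_lines := (PySem.List.pyRange 50 (total + 1) 50).map pvToc
  let new_lines := (lines.zip (counts.zip ((0 : Int) :: counts))).flatMap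
    (fun p => if decide (p.2.2 < p.2.1) && (PySem.Int.mod p.2.1 50 == 0)
      then [pvSpan p.2.1, p.1] else [p.1])
  PySem.List.slice new_lines (some 0) (some 3) ++ ["<div id=\"top\"></div>"] ++ toc_lines
    ++ PySem.List.slice new_lines (some 3) none

-- ===== PRECONDITION & SPEC =====
def Spec_add_toc (lines : List String) (out : List String) : Prop := out = add_toc_alt lines
instance (lines : List String) (out : List String) : Decidable (Spec_add_toc lines out) := by unfold Spec_add_toc; infer_instance

-- ===== CLAIM =====
def Claim_equal_add_toc : Prop := ∀ (lines : List String), Dom_add_toc lines → Spec_add_toc lines (add_toc lines)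

-- ===== LEMMAS AND PROOFS =====

-- the number of entry lines
def pvCnt (lines : List String) : Nat := lines.countP (fun l => PySem.Str.isIn pvMarker l)

-- the prefix counts (recursive form of Source B's counts loop)
def pvScan : List String → Int → List Int
  | [], _ => []
  | l :: r, c =>
    let c' := if PySem.Str.isIn pvMarker l then c + 1 else c
    c' :: pvScan r c'

-- the rewritten body, by structural recursion with a Nat counter
def pvRw : List String → Nat → List String
  | [], _ => []
  | l :: r, c =>
    if PySem.Str.isIn pvMarker l then
      (if (c + 1) % 50 = 0 then [pvSpan ((c + 1 : Nat) : Int), l] else [l]) ++ pvRw r (c + 1)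
    else
      l :: pvRw r c

-- the multiples of 50 in (c, c+k], as Ints, generated one slot at a time
def pvMultsFuel (c : Nat) : Nat → List Int
  | 0 => []
  | k + 1 =>
    (if (c + 1) % 50 = 0 then [((c + 1 : Nat) : Int)] else []) ++ pvMultsFuel (c + 1) k

lemma pvMultsFuel_closed : ∀ (k c : Nat),
    pvMultsFuel c k =
      (List.range ((c + k) / 50 - c / 50)).map (fun j => ((50 * (c / 50 + j + 1) : Nat) : Int)) := by
  intro k
  induction k with
  | zero => intro c; simp [pvMultsFuel]
  | succ k ih =>
    intro c
    rw [pvMultsFuel, ih (c + 1)]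
    by_cases h : (c + 1) % 50 = 0
    · have h1 : (c + 1) / 50 = c / 50 + 1 := by omega
      have h2 : (c + 1 + k) / 50 - (c + 1) / 50 + 1 = (c + (k + 1)) / 50 - c / 50 := by omega
      rw [if_pos h, ← h2, List.range_succ_eq_map]
      simp only [List.map_cons, List.map_map, List.singleton_append]
      congr 1
      · congr 1; omega
      · apply List.map_congr_left
        intro j _
        simp only [Function.comp]
        congr 1
        omega
    · have h1 : (c + 1) / 50 = c / 50 := by omega
      have h2 : (c + 1 + k) / 50 = (c + (k + 1)) / 50 := by omega
      rw [if_neg h]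
      simp only [List.nil_append, h1, h2]

lemma pvPyRange_closed (k : Nat) :
    PySem.List.pyRange 50 ((k : Int) + 1) 50 =
      (List.range (k / 50)).map (fun j => ((50 * (j + 1) : Nat) : Int)) := by
  rw [PySem.List.pyRange_of_pos 50 ((k : Int) + 1) (by norm_num)]
  have hm : (if (50 : Int) < (k : Int) + 1 then (((k : Int) + 1 - 50 + 50 - 1) / 50).toNat else 0)
      = k / 50 := by
    split_ifs with h
    · have : ((k : Int) + 1 - 50 + 50 - 1) = (k : Int) := by ring
      rw [this]
      have hdiv : (k : Int) / 50 = ((k / 50 : Nat) : Int) := by push_cast; rfl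
      rw [hdiv, Int.toNat_natCast]
    · omega
  rw [hm]
  apply List.map_congr_left
  intro j _
  push_cast
  ring

-- Source B's counts loop equals the recursive scan
lemma pvFoldl_cntStep : ∀ (lines : List String) (acc : List Int) (c : Nat),
    lines.foldl pvCntStep (acc, (c : Int)) =
      (acc ++ pvScan lines (c : Int), ((c + pvCnt lines : Nat) : Int)) := by
  intro lines
  induction lines with
  | nil => intro acc c; simp [pvCnt, pvScan]
  | cons l r ih =>
    intro acc c
    rw [List.foldl_cons]
    by_cases hl : PySem.Str.isIn pvMarker l = true
    · have hl2 : PySem.Chars.isIn pvMarker.toList l.toList = true := by simpa using hl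
      have hcnt : pvCnt (l :: r) = pvCnt r + 1 := by
        simp [pvCnt, hl2]
      have hsc : pvScan (l :: r) (c : Int) = ((c + 1 : Nat) : Int) :: pvScan r ((c + 1 : Nat) : Int) := by
        simp [pvScan, hl2]
      have hs : pvCntStep (acc, (c : Int)) l = (acc ++ [((c + 1 : Nat) : Int)], ((c + 1 : Nat) : Int)) := by
        simp [pvCntStep, hl2]
      rw [hs, ih _ (c + 1), hsc, hcnt]
      simp only [List.append_assoc, List.singleton_append, Prod.mk.injEq, true_and]
      omega
    · have hl2 : PySem.Chars.isIn pvMarker.toList l.toList = false := by simpa using hl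
      have hcnt : pvCnt (l :: r) = pvCnt r := by
        simp [pvCnt, hl2]
      have hsc : pvScan (l :: r) (c : Int) = (c : Int) :: pvScan r (c : Int) := by
        simp [pvScan, hl2]
      have hs : pvCntStep (acc, (c : Int)) l = (acc ++ [(c : Int)], (c : Int)) := by
        simp [pvCntStep, hl2]
      rw [hs, ih _ c, hsc, hcnt]
      simp only [List.append_assoc, List.singleton_append]

-- the last prefix count is the total number of entry lines
lemma pvScan_getLast? : ∀ (lines : List String) (c : Nat), lines ≠ [] →
    (pvScan lines (c : Int)).getLast? = some ((c + pvCnt lines : Nat) : Int) := by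
  intro lines
  induction lines with
  | nil => intro c h; exact absurd rfl h
  | cons l r ih =>
    intro c _
    by_cases hl : PySem.Str.isIn pvMarker l = true
    · have hl2 : PySem.Chars.isIn pvMarker.toList l.toList = true := by simpa using hl
      have hsc : pvScan (l :: r) (c : Int) = ((c + 1 : Nat) : Int) :: pvScan r ((c + 1 : Nat) : Int) := by
        simp [pvScan, hl2]
      rw [hsc]
      cases r with
      | nil => simp [pvScan, pvCnt, hl2]
      | cons l2 r2 =>
        rcases hr : pvScan (l2 :: r2) ((c + 1 : Nat) : Int) with _ | ⟨x, xs⟩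
        · exfalso
          revert hr
          simp only [pvScan]
          split <;> simp
        · rw [List.getLast?_cons_cons, ← hr, ih (c + 1) (by simp)]
          have : pvCnt (l :: l2 :: r2) = pvCnt (l2 :: r2) + 1 := by simp [pvCnt, hl2]
          rw [this]
          congr 2
          omega
    · have hl2 : PySem.Chars.isIn pvMarker.toList l.toList = false := by simpa using hl
      have hsc : pvScan (l :: r) (c : Int) = (c : Int) :: pvScan r (c : Int) := by
        simp [pvScan, hl2]
      rw [hsc]
      cases r with
      | nil => simp [pvScan, pvCnt, hl2]
      | cons l2 r2 =>
        rcases hr : pvScan (l2 :: r2) (c : Int) with _ | ⟨x, xs⟩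
        · exfalso
          revert hr
          simp only [pvScan]
          split <;> simp
        · rw [List.getLast?_cons_cons, ← hr, ih c (by simp)]
          have : pvCnt (l :: l2 :: r2) = pvCnt (l2 :: r2) := by simp [pvCnt, hl2]
          rw [this]

-- B's stateless comprehension over zip(lines, counts, 0 :: counts) is the recursive rewrite
lemma pvZip_flatMap : ∀ (lines : List String) (c : Nat),
    (lines.zip ((pvScan lines (c : Int)).zip ((c : Int) :: pvScan lines (c : Int)))).flatMap
      (fun p => if decide (p.2.2 < p.2.1) && (PySem.Int.mod p.2.1 50 == 0)
        then [pvSpan p.2.1, p.1] else [p.1]) = pvRw lines c := by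
  intro lines
  induction lines with
  | nil => intro c; simp [pvScan, pvRw]
  | cons l r ih =>
    intro c
    by_cases hl : PySem.Str.isIn pvMarker l = true
    · have hl2 : PySem.Chars.isIn pvMarker.toList l.toList = true := by simpa using hl
      have hsc : pvScan (l :: r) (c : Int) = ((c + 1 : Nat) : Int) :: pvScan r ((c + 1 : Nat) : Int) := by
        simp [pvScan, hl2]
      rw [hsc]
      simp only [List.zip_cons_cons, List.flatMap_cons]
      rw [ih (c + 1)]
      have hlt : decide ((c : Int) < ((c + 1 : Nat) : Int)) = true := by
        simp
      have h0 : PySem.Int.mod ((c + 1 : Nat) : Int) 50 = (((c + 1) % 50 : Nat) : Int) := by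
        exact_mod_cast PySem.Int.mod_natCast (c + 1) 50
      by_cases h : (c + 1) % 50 = 0
      · have hb : ((((c + 1) % 50 : Nat) : Int) == 0) = true := by simp [h]
        simp only [hlt, h0, hb, Bool.true_and, if_true, pvRw, hl, if_pos h,
          List.cons_append, List.nil_append]
      · have hb : ((((c + 1) % 50 : Nat) : Int) == 0) = false := by
          simp
          omega
        simp only [hlt, h0, hb, Bool.true_and, Bool.false_eq_true, if_false, pvRw, hl,
          if_true, if_neg h, List.cons_append, List.nil_append]
    · have hl2 : PySem.Chars.isIn pvMarker.toList l.toList = false := by simpa using hl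
      have hl' : PySem.Str.isIn pvMarker l = false := by simpa using hl
      have hsc : pvScan (l :: r) (c : Int) = (c : Int) :: pvScan r (c : Int) := by
        simp [pvScan, hl2]
      rw [hsc]
      simp only [List.zip_cons_cons, List.flatMap_cons]
      rw [ih c]
      have hlt : decide ((c : Int) < (c : Int)) = false := by simp
      simp only [hlt, Bool.false_and, Bool.false_eq_true, if_false, pvRw, hl',
        List.cons_append, List.nil_append]

-- A's loop: the space counter is always entry%50, the toc is the multiples of 50 passed,
-- and new_lines evolve exactly as the recursive rewrite
lemma pvLoop_eq : ∀ (lines : List String) (c : Nat) (toc new : List String),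
    lines.foldl pvStepA (toc, new, (c : Int), ((c % 50 : Nat) : Int)) =
      (toc ++ (pvMultsFuel c (pvCnt lines)).map pvToc,
       new ++ pvRw lines c,
       ((c + pvCnt lines : Nat) : Int),
       (((c + pvCnt lines) % 50 : Nat) : Int)) := by
  intro lines
  induction lines with
  | nil => intro c toc new; simp [pvCnt, pvMultsFuel, pvRw]
  | cons line rest ih =>
    intro c toc new
    rw [List.foldl_cons]
    by_cases hl : PySem.Str.isIn pvMarker line = true
    · have hl2 : PySem.Chars.isIn pvMarker.toList line.toList = true := by simpa using hl
      have hcnt : pvCnt (line :: rest) = pvCnt rest + 1 := by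
        simp [pvCnt, hl2]
      by_cases hfire : (c + 1) % 50 = 0
      · have hsA : pvStepA (toc, new, (c : Int), ((c % 50 : Nat) : Int)) line
            = (toc ++ [pvToc ((c + 1 : Nat) : Int)], new ++ [pvSpan ((c + 1 : Nat) : Int), line],
               ((c + 1 : Nat) : Int), (((c + 1) % 50 : Nat) : Int)) := by
          simp only [pvStepA, hl, if_true]
          split_ifs with h
          · simp only [Prod.mk.injEq]
            push_cast
            and_intros <;> first | trivial | omega
          · exfalso; simp at h; omega
        rw [hsA, ih (c + 1), hcnt]
        simp only [pvMultsFuel, if_pos hfire, List.map_append, List.map_cons, List.map_nil,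
          List.append_assoc, List.cons_append, Prod.mk.injEq, pvRw, hl, if_true]
        and_intros <;> first | trivial | (congr 1; omega)
      · have hsA : pvStepA (toc, new, (c : Int), ((c % 50 : Nat) : Int)) line
            = (toc, new ++ [line], ((c + 1 : Nat) : Int), (((c + 1) % 50 : Nat) : Int)) := by
          simp only [pvStepA, hl, if_true]
          split_ifs with h
          · exfalso; simp at h; omega
          · simp only [Prod.mk.injEq]
            push_cast
            and_intros <;> first | trivial | omega
        rw [hsA, ih (c + 1), hcnt]
        simp only [pvMultsFuel, if_neg hfire, List.nil_append, Prod.mk.injEq, pvRw, hl, if_true]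
        and_intros <;> first | trivial | (congr 1; omega) | simp
    · have hl' : PySem.Str.isIn pvMarker line = false := by
        simpa using hl
      have hl2 : PySem.Chars.isIn pvMarker.toList line.toList = false := by simpa using hl
      have hcnt : pvCnt (line :: rest) = pvCnt rest := by
        simp [pvCnt, hl2]
      have hsA : pvStepA (toc, new, (c : Int), ((c % 50 : Nat) : Int)) line
          = (toc, new ++ [line], (c : Int), ((c % 50 : Nat) : Int)) := by
        simp only [pvStepA, hl', Bool.false_eq_true, if_false]
      rw [hsA, ih c, hcnt]
      simp [pvRw, hl2]

-- ===== VERDICT =====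
theorem add_toc_spec : Claim_equal_add_toc := by
  intro lines _
  unfold Spec_add_toc add_toc add_toc_alt
  have hA := pvLoop_eq lines 0 [] []
  norm_num at hA
  have hcounts := pvFoldl_cntStep lines [] 0
  norm_num at hcounts
  have htotal : (PySem.List.pyGet? (pvScan lines 0) (-1)).getD 0 = ((pvCnt lines : Nat) : Int) := by
    rw [PySem.List.pyGet?_neg_one]
    cases lines with
    | nil => simp [pvScan, pvCnt]
    | cons l r =>
      have h := pvScan_getLast? (l :: r) 0 (by simp)
      norm_num at h
      rw [h]
      rfl
  have htoc : PySem.List.pyRange 50 (((pvCnt lines : Nat) : Int) + 1) 50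
      = pvMultsFuel 0 (pvCnt lines) := by
    rw [pvMultsFuel_closed, pvPyRange_closed]
    norm_num
  have hnew := pvZip_flatMap lines 0
  simp only [Nat.cast_zero] at hnew
  simp only [hA, hcounts, htotal, htoc, hnew]
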